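-- pv_equiv track=rewrite | github.com/justmaker/type-exercise | build_dict.py | cangjie_to_display
-- ===== SOURCE A (Python) =====
-- CANGJIE_MAP = {
--     'a': '日', 'b': '月', 'c': '金', 'd': '木', 'e': '水',
--     'f': '火', 'g': '土', 'h': '竹', 'i': '戈', 'j': '十',
--     'k': '大', 'l': '中', 'm': '一', 'n': '弓', 'o': '人',
--     'p': '心', 'q': '手', 'r': '口', 's': '尸', 't': '廿',
--     'u': '山', 'v': '女', 'w': '田', 'x': '難', 'y': '卜',
--     'z': '重',
-- }
--
-- def cangjie_to_display(code: str) -> str: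
--     """將倉頡字母碼轉換為中文字根顯示"""
--     result = []
--     for char in code.lower():
--         if char in CANGJIE_MAP:
--             result.append(CANGJIE_MAP[char])
--         else:
--             result.append(char)
--     return ''.join(result)
-- ===== SOURCE B (Python) =====
-- CANGJIE_MAP = {
--     'a': '日', 'b': '月', 'c': '金', 'd': '木', 'e': '水',
--     'f': '火', 'g': '土', 'h': '竹', 'i': '戈', 'j': '十',
--     'k': '大', 'l': '中', 'm': '一', 'n': '弓', 'o': '人',
--     'p': '心', 'q': '手', 'r': '口', 's': '尸', 't': '廿',
--     'u': '山', 'v': '女', 'w': '田', 'x': '難', 'y': '卜',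
--     'z': '重',
-- }
--
-- def cangjie_to_display(code: str) -> str:
--     """將倉頡字母碼轉換為中文字根顯示"""
--     # Staged rewriting: one whole-string replace pass per letter. Correct because
--     # every radical is a non-ASCII character, so an earlier pass's output can never
--     # be rewritten by a later pass.
--     s = code.lower()
--     for letter, radical in CANGJIE_MAP.items():
--         s = s.replace(letter, radical)
--     return s
-- ===== Notes on version B (the rewrite author's own statement) =====
-- stated objective: alternative
-- what changed: Replaced A's single per-character scan with dict membership and list accumulator by 26 staged whole-string str.replace passes (one per letter), correct because every radical is non-ASCII so a later pass never rewrites an earlier pass's output.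
import Mathlib
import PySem

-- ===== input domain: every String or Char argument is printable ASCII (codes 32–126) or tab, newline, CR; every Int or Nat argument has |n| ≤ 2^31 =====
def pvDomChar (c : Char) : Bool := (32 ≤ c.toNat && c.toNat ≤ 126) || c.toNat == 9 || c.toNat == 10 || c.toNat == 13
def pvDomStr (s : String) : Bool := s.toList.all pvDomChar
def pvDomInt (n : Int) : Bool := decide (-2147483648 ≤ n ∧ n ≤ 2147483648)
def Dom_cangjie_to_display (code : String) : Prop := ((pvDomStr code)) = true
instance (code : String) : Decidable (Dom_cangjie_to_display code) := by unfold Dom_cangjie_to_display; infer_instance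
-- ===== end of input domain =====

-- B replaces A's single per-character scan (dict membership + list accumulator) by 26 staged
-- whole-string str.replace passes, one per letter; correct because every radical is non-ASCII,
-- so a later pass never rewrites an earlier pass's output (objective: alternative).

-- ===== PORT A =====
-- CANGJIE_MAP: keys are the single-letter strings 'a'..'z', modelled as Char
def pvCangjieMap : PySem.Dict Char String := PySem.Dict.mk
  [('a', "日"), ('b', "月"), ('c', "金"), ('d', "木"), ('e', "水"),
   ('f', "火"), ('g', "土"), ('h', "竹"), ('i', "戈"), ('j', "十"),
   ('k', "大"), ('l', "中"), ('m', "一"), ('n', "弓"), ('o', "人"),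
   ('p', "心"), ('q', "手"), ('r', "口"), ('s', "尸"), ('t', "廿"),
   ('u', "山"), ('v', "女"), ('w', "田"), ('x', "難"), ('y', "卜"),
   ('z', "重")]

def cangjie_to_display (code : String) : String :=
  let result : List String :=
    (PySem.Str.lower code).toList.foldl (fun acc ch =>
      if pvCangjieMap.contains ch then
        acc ++ [pvCangjieMap.getD ch ""]
      else
        acc ++ [ch.toString]) []
  PySem.Str.join "" result

-- ===== PORT B =====
-- CANGJIE_MAP.items(), in insertion order, as (letter, radical) string pairs
def pvPairs : List (String × String) :=
  [("a", "日"), ("b", "月"), ("c", "金"), ("d", "木"), ("e", "水"),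
   ("f", "火"), ("g", "土"), ("h", "竹"), ("i", "戈"), ("j", "十"),
   ("k", "大"), ("l", "中"), ("m", "一"), ("n", "弓"), ("o", "人"),
   ("p", "心"), ("q", "手"), ("r", "口"), ("s", "尸"), ("t", "廿"),
   ("u", "山"), ("v", "女"), ("w", "田"), ("x", "難"), ("y", "卜"),
   ("z", "重")]

-- s = code.lower(); for letter, radical in CANGJIE_MAP.items(): s = s.replace(letter, radical)
def cangjie_to_display_alt (code : String) : String :=
  pvPairs.foldl (fun s p => PySem.Str.replace s p.1 p.2) (PySem.Str.lower code)

-- ===== PRECONDITION & SPEC =====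
def Spec_cangjie_to_display (code : String) (out : String) : Prop := out = cangjie_to_display_alt code
instance (code : String) (out : String) : Decidable (Spec_cangjie_to_display code out) := by unfold Spec_cangjie_to_display; infer_instance

-- ===== CLAIM (what is proved, stated in full; the proofs are below) =====
def Claim_equal_cangjie_to_display : Prop := ∀ (code : String), Dom_cangjie_to_display code → Spec_cangjie_to_display code (cangjie_to_display code)

-- ===== LEMMAS AND PROOFS =====

-- replace with a single-character pattern is a per-character flatMap
theorem pvGoSingle (o : Char) (n : List Char) :
    ∀ (l acc : List Char),
      PySem.Chars.replace.go [o] n l.length l acc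
        = acc.reverse ++ l.flatMap (fun c => if c = o then n else [c]) := by
  intro l
  induction l with
  | nil => intro acc; simp [PySem.Chars.replace.go.eq_def]
  | cons c t ih =>
    intro acc
    rw [List.length_cons, PySem.Chars.replace.go.eq_def]
    by_cases h : c = o
    · subst h
      simp only [List.isPrefixOf, if_pos, List.flatMap_cons]
      simp [ih, List.append_assoc]
    · have hp : ([o].isPrefixOf (c :: t)) = false := by
        simp [List.isPrefixOf]
        intro hco; exact h hco.symm
      simp only [hp]
      simp [ih, h]

theorem pvReplaceOne (o : Char) (n l : List Char) :
    PySem.Chars.replace l [o] n = l.flatMap (fun c => if c = o then n else [c]) := by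
  simp [PySem.Chars.replace, pvGoSingle]

-- B's foldl over strings, seen through toList, is a foldl of Chars.replace
theorem pvFoldToList (ps : List (String × String)) (s : String) :
    (ps.foldl (fun s p => PySem.Str.replace s p.1 p.2) s).toList
      = ps.foldl (fun l p => PySem.Chars.replace l p.1.toList p.2.toList) s.toList := by
  induction ps generalizing s with
  | nil => rfl
  | cons p t ih => simp [List.foldl_cons, ih, PySem.Str.toList_replace]

-- the character-level chain of the 26 replace passes
def pvF (l : List Char) : List Char :=
  pvPairs.foldl (fun l p => PySem.Chars.replace l p.1.toList p.2.toList) l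

-- a chain of single-character replace passes acts independently on each character
theorem pvChainFlatMap (ps : List (String × String))
    (hps : ∀ p ∈ ps, ∃ o : Char, p.1.toList = [o]) :
    ∀ l : List Char,
      ps.foldl (fun l p => PySem.Chars.replace l p.1.toList p.2.toList) l
        = l.flatMap (fun c => ps.foldl (fun l p => PySem.Chars.replace l p.1.toList p.2.toList) [c]) := by
  induction ps with
  | nil => intro l; simp
  | cons p t ih =>
    intro l
    obtain ⟨o, ho⟩ := hps p (by simp)
    have ht : ∀ q ∈ t, ∃ o : Char, q.1.toList = [o] := fun q hq => hps q (by simp [hq])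
    simp only [List.foldl_cons]
    rw [ih ht (PySem.Chars.replace l p.1.toList p.2.toList), ho, pvReplaceOne,
      List.flatMap_assoc]
    congr 1
    funext c
    rw [← ih ht]
    congr 1
    rw [pvReplaceOne]
    by_cases h : c = o <;> simp [h]

theorem pvFflat (l : List Char) : pvF l = l.flatMap (fun c => pvF [c]) := by
  unfold pvF
  apply pvChainFlatMap
  intro p hp
  fin_cases hp <;> exact ⟨_, rfl⟩

-- a single pass leaves a character it does not match unchanged
theorem pvReplaceSingleton (c o : Char) (n : List Char) (h : ¬ c = o) :
    PySem.Chars.replace [c] [o] n = [c] := by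
  rw [pvReplaceOne]; simp [h]

-- per character, the 26-pass chain computes exactly A's per-character substitution
theorem pvPerChar (c : Char) :
    (if pvCangjieMap.contains c then pvCangjieMap.getD c "" else c.toString).toList = pvF [c] := by
  by_cases h1 : c = 'a'; · subst h1; decide
  by_cases h2 : c = 'b'; · subst h2; decide
  by_cases h3 : c = 'c'; · subst h3; decide
  by_cases h4 : c = 'd'; · subst h4; decide
  by_cases h5 : c = 'e'; · subst h5; decide
  by_cases h6 : c = 'f'; · subst h6; decide
  by_cases h7 : c = 'g'; · subst h7; decide
  by_cases h8 : c = 'h'; · subst h8; decide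
  by_cases h9 : c = 'i'; · subst h9; decide
  by_cases h10 : c = 'j'; · subst h10; decide
  by_cases h11 : c = 'k'; · subst h11; decide
  by_cases h12 : c = 'l'; · subst h12; decide
  by_cases h13 : c = 'm'; · subst h13; decide
  by_cases h14 : c = 'n'; · subst h14; decide
  by_cases h15 : c = 'o'; · subst h15; decide
  by_cases h16 : c = 'p'; · subst h16; decide
  by_cases h17 : c = 'q'; · subst h17; decide
  by_cases h18 : c = 'r'; · subst h18; decide
  by_cases h19 : c = 's'; · subst h19; decide
  by_cases h20 : c = 't'; · subst h20; decide
  by_cases h21 : c = 'u'; · subst h21; decide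
  by_cases h22 : c = 'v'; · subst h22; decide
  by_cases h23 : c = 'w'; · subst h23; decide
  by_cases h24 : c = 'x'; · subst h24; decide
  by_cases h25 : c = 'y'; · subst h25; decide
  by_cases h26 : c = 'z'; · subst h26; decide
  have hcont : pvCangjieMap.contains c = false := by
    simp [pvCangjieMap, PySem.Dict.contains,
      Ne.symm h1, Ne.symm h2, Ne.symm h3, Ne.symm h4, Ne.symm h5, Ne.symm h6,
      Ne.symm h7, Ne.symm h8, Ne.symm h9, Ne.symm h10, Ne.symm h11, Ne.symm h12,
      Ne.symm h13, Ne.symm h14, Ne.symm h15, Ne.symm h16, Ne.symm h17, Ne.symm h18,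
      Ne.symm h19, Ne.symm h20, Ne.symm h21, Ne.symm h22, Ne.symm h23, Ne.symm h24,
      Ne.symm h25, Ne.symm h26]
  rw [hcont]
  simp only [Bool.false_eq_true, if_false]
  unfold pvF pvPairs
  simp only [List.foldl_cons, List.foldl_nil,
    show ("a":String).toList = ['a'] from rfl, show ("b":String).toList = ['b'] from rfl,
    show ("c":String).toList = ['c'] from rfl, show ("d":String).toList = ['d'] from rfl,
    show ("e":String).toList = ['e'] from rfl, show ("f":String).toList = ['f'] from rfl,
    show ("g":String).toList = ['g'] from rfl, show ("h":String).toList = ['h'] from rfl,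
    show ("i":String).toList = ['i'] from rfl, show ("j":String).toList = ['j'] from rfl,
    show ("k":String).toList = ['k'] from rfl, show ("l":String).toList = ['l'] from rfl,
    show ("m":String).toList = ['m'] from rfl, show ("n":String).toList = ['n'] from rfl,
    show ("o":String).toList = ['o'] from rfl, show ("p":String).toList = ['p'] from rfl,
    show ("q":String).toList = ['q'] from rfl, show ("r":String).toList = ['r'] from rfl,
    show ("s":String).toList = ['s'] from rfl, show ("t":String).toList = ['t'] from rfl,
    show ("u":String).toList = ['u'] from rfl, show ("v":String).toList = ['v'] from rfl,
    show ("w":String).toList = ['w'] from rfl, show ("x":String).toList = ['x'] from rfl,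
    show ("y":String).toList = ['y'] from rfl, show ("z":String).toList = ['z'] from rfl]
  rw [pvReplaceSingleton c 'a' _ h1]
  rw [pvReplaceSingleton c 'b' _ h2]
  rw [pvReplaceSingleton c 'c' _ h3]
  rw [pvReplaceSingleton c 'd' _ h4]
  rw [pvReplaceSingleton c 'e' _ h5]
  rw [pvReplaceSingleton c 'f' _ h6]
  rw [pvReplaceSingleton c 'g' _ h7]
  rw [pvReplaceSingleton c 'h' _ h8]
  rw [pvReplaceSingleton c 'i' _ h9]
  rw [pvReplaceSingleton c 'j' _ h10]
  rw [pvReplaceSingleton c 'k' _ h11]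
  rw [pvReplaceSingleton c 'l' _ h12]
  rw [pvReplaceSingleton c 'm' _ h13]
  rw [pvReplaceSingleton c 'n' _ h14]
  rw [pvReplaceSingleton c 'o' _ h15]
  rw [pvReplaceSingleton c 'p' _ h16]
  rw [pvReplaceSingleton c 'q' _ h17]
  rw [pvReplaceSingleton c 'r' _ h18]
  rw [pvReplaceSingleton c 's' _ h19]
  rw [pvReplaceSingleton c 't' _ h20]
  rw [pvReplaceSingleton c 'u' _ h21]
  rw [pvReplaceSingleton c 'v' _ h22]
  rw [pvReplaceSingleton c 'w' _ h23]
  rw [pvReplaceSingleton c 'x' _ h24]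
  rw [pvReplaceSingleton c 'y' _ h25]
  rw [pvReplaceSingleton c 'z' _ h26]
  simp

-- A's accumulator loop is a map
theorem pvALoop (l : List Char) (acc : List String) :
    l.foldl (fun acc ch =>
      if pvCangjieMap.contains ch then acc ++ [pvCangjieMap.getD ch ""]
      else acc ++ [ch.toString]) acc
      = acc ++ l.map (fun ch => if pvCangjieMap.contains ch then pvCangjieMap.getD ch "" else ch.toString) := by
  induction l generalizing acc with
  | nil => simp
  | cons c t ih =>
    simp only [List.foldl_cons, List.map_cons]
    by_cases h : pvCangjieMap.contains c
    · rw [if_pos h, if_pos h, ih]; simp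
    · rw [if_neg h, if_neg h, ih]; simp

theorem pvJoinNil (parts : List (List Char)) : PySem.Chars.join [] parts = parts.flatten := by
  simp [PySem.Chars.join, List.intercalate]
  induction parts with
  | nil => rfl
  | cons a t ih => cases t <;> simp_all [List.intersperse]

-- ===== VERDICT (by name: the statement is the Claim_ definition above) =====
theorem cangjie_to_display_spec : Claim_equal_cangjie_to_display := by
  intro code _
  unfold Spec_cangjie_to_display cangjie_to_display cangjie_to_display_alt
  apply String.toList_inj.mp
  rw [pvFoldToList, pvALoop, PySem.Str.toList_join]
  rw [show ("" : String).toList = [] from rfl]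
  simp only [List.nil_append]
  rw [pvJoinNil, List.map_map, ← List.flatMap_def]
  rw [show (String.toList ∘ fun ch => (if pvCangjieMap.contains ch then pvCangjieMap.getD ch "" else ch.toString))
        = fun ch => pvF [ch] from funext fun c => pvPerChar c]
  rw [← pvFflat]
  rfl
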